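-- pv_equiv track=rewrite | github.com/sofiebudman/PythonHonors | budman_rainStats.py | calc
-- ===== SOURCE A (Python) =====
-- def calc(rainData):
--     months = ['January','February', 'March','April','May','June','July','August','September','October','November','December']
--     maxRain = max(rainData)
--     maxIndex = [i for i, val in enumerate(rainData) if val == maxRain]
--     maxMonths = [months[i] for i in maxIndex]
--
--     minRain = min(rainData)
--     minIndex = [j for j, val in enumerate(rainData) if val == minRain]
--     minMonths = [months[j] for j in minIndex]
--
--     return [maxMonths,minMonths]
-- ===== SOURCE B (Python) =====
-- def calc(rainData):
--     months = ['January','February', 'March','April','May','June','July','August','September','October','November','December']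
--     maxRain = minRain = rainData[0]
--     maxMonths = [months[0]]
--     minMonths = [months[0]]
--     for i in range(1, len(rainData)):
--         v = rainData[i]
--         if v > maxRain:
--             maxRain = v
--             maxMonths = [months[i]]
--         elif v == maxRain:
--             maxMonths.append(months[i])
--         if v < minRain:
--             minRain = v
--             minMonths = [months[i]]
--         elif v == minRain:
--             minMonths.append(months[i])
--     return [maxMonths, minMonths]
-- ===== Notes on version B (the rewrite author's own statement) =====
-- stated objective: alternative
-- what changed: B replaces A's four separate scans (max, min, two enumerate-filter passes plus two index-lookup comprehensions) with one single pass over the data that maintains running max/min and their month lists simultaneously.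
import Mathlib
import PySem

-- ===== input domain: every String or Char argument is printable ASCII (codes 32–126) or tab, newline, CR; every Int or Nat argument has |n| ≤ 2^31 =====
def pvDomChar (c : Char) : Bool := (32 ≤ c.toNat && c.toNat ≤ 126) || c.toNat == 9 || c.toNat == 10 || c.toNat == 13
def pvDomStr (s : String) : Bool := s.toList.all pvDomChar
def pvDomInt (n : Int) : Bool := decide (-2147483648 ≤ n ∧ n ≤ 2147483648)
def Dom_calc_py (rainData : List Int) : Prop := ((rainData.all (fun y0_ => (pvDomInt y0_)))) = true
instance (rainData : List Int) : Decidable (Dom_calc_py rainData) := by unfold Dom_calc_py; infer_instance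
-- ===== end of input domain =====

-- B replaces A's four separate scans with one single pass maintaining running max/min and their month lists (alternative decomposition, same return value).


-- ===== PORT A =====
def pvMonths : List String := ["January","February","March","April","May","June","July","August","September","October","November","December"]

-- enumerate(xs): list of (index, value) pairs, exact transliteration of Python's enumerate
def pvEnumFrom (i : Nat) : List Int → List (Nat × Int)
  | [] => []
  | v :: r => (i, v) :: pvEnumFrom (i + 1) r

def calc_py (rainData : List Int) : List (List String) :=
  match rainData with
  | [] => [[], []]  -- Python: max([]) raises ValueError; excluded by Pre_
  | h :: t =>
    -- maxRain = max(rainData): Python max keeps the first element, replacing on strictly greater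
    let maxRain := t.foldl (fun m v => if v > m then v else m) h
    let maxIndex := ((pvEnumFrom 0 (h :: t)).filter (fun p => decide (p.2 = maxRain))).map (fun p => p.1)
    -- months[i]: in-range for all indices admitted by Pre_ (length ≤ 12); Python raises IndexError otherwise
    let maxMonths := maxIndex.map (fun i => pvMonths.getD i "")
    let minRain := t.foldl (fun m v => if v < m then v else m) h
    let minIndex := ((pvEnumFrom 0 (h :: t)).filter (fun p => decide (p.2 = minRain))).map (fun p => p.1)
    let minMonths := minIndex.map (fun i => pvMonths.getD i "")
    [maxMonths, minMonths]

-- ===== PORT B =====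
-- the single for-loop of Source B: index i, running (maxRain, maxMonths, minRain, minMonths)
def pvCalcLoop : List Int → Nat → Int → List String → Int → List String → (Int × List String) × (Int × List String)
  | [], _, M, ms, m, ns => ((M, ms), (m, ns))
  | v :: r, i, M, ms, m, ns =>
    let mx := if v > M then (v, [pvMonths.getD i ""])
              else if v = M then (M, ms ++ [pvMonths.getD i ""]) else (M, ms)
    let mn := if v < m then (v, [pvMonths.getD i ""])
              else if v = m then (m, ns ++ [pvMonths.getD i ""]) else (m, ns)
    pvCalcLoop r (i + 1) mx.1 mx.2 mn.1 mn.2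

def calc_py_alt (rainData : List Int) : List (List String) :=
  match rainData with
  | [] => [[], []]  -- Source B: rainData[0] raises IndexError; excluded by Pre_
  | h :: t =>
    let st := pvCalcLoop t 1 h [pvMonths.getD 0 ""] h [pvMonths.getD 0 ""]
    [st.1.2, st.2.2]

-- ===== PRECONDITION & SPEC =====
-- Pre_ excludes the empty list (A's max([]) raises ValueError) and lists longer than the 12
-- months (A's months[i] raises IndexError there).
def Pre_calc_py (rainData : List Int) : Prop := rainData ≠ [] ∧ rainData.length ≤ 12
instance (rainData : List Int) : Decidable (Pre_calc_py rainData) := by unfold Pre_calc_py; infer_instance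
def pvWitness_calc_py : List Int := [3, 7, 7, 1]

def Spec_calc_py (rainData : List Int) (out : List (List String)) : Prop := out = calc_py_alt rainData
instance (rainData : List Int) (out : List (List String)) : Decidable (Spec_calc_py rainData out) := by unfold Spec_calc_py; infer_instance

-- ===== CLAIM (what is proved, stated in full; the proofs are below) =====
def Claim_equal_calc_py : Prop := ∀ (rainData : List Int), Dom_calc_py rainData → Pre_calc_py rainData → Spec_calc_py rainData (calc_py rainData)

-- ===== LEMMAS AND PROOFS =====

-- the two halves of B's loop state evolve independently
def pvGoMax : List Int → Nat → Int → List String → Int × List String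
  | [], _, M, ms => (M, ms)
  | v :: r, i, M, ms =>
    if v > M then pvGoMax r (i + 1) v [pvMonths.getD i ""]
    else if v = M then pvGoMax r (i + 1) M (ms ++ [pvMonths.getD i ""])
    else pvGoMax r (i + 1) M ms

def pvGoMin : List Int → Nat → Int → List String → Int × List String
  | [], _, m, ns => (m, ns)
  | v :: r, i, m, ns =>
    if v < m then pvGoMin r (i + 1) v [pvMonths.getD i ""]
    else if v = m then pvGoMin r (i + 1) m (ns ++ [pvMonths.getD i ""])
    else pvGoMin r (i + 1) m ns

lemma pvCalcLoop_split (r : List Int) : ∀ (i : Nat) (M : Int) (ms : List String) (m : Int) (ns : List String),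
    pvCalcLoop r i M ms m ns = (pvGoMax r i M ms, pvGoMin r i m ns) := by
  induction r with
  | nil => intro i M ms m ns; rfl
  | cons v r ih =>
    intro i M ms m ns
    simp only [pvCalcLoop, pvGoMax, pvGoMin]
    split_ifs <;> simp [ih]

def pvFMax (M : Int) (r : List Int) : Int := r.foldl (fun m v => if v > m then v else m) M
def pvFMin (m : Int) (r : List Int) : Int := r.foldl (fun m v => if v < m then v else m) m

def pvSel (i : Nat) (r : List Int) (x : Int) : List String :=
  ((pvEnumFrom i r).filter (fun p => decide (p.2 = x))).map (fun p => pvMonths.getD p.1 "")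

lemma pvFMax_le (r : List Int) : ∀ M : Int, M ≤ pvFMax M r := by
  induction r with
  | nil => intro M; simp [pvFMax]
  | cons v r ih =>
    intro M
    simp only [pvFMax, List.foldl] at *
    split_ifs with h
    · exact le_trans (le_of_lt h) (ih v)
    · exact ih M

lemma pvFMin_le (r : List Int) : ∀ m : Int, pvFMin m r ≤ m := by
  induction r with
  | nil => intro m; simp [pvFMin]
  | cons v r ih =>
    intro m
    simp only [pvFMin, List.foldl] at *
    split_ifs with h
    · exact le_trans (ih v) (le_of_lt h)
    · exact ih m

lemma pvSel_cons (i : Nat) (v : Int) (r : List Int) (x : Int) :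
    pvSel i (v :: r) x = (if v = x then [pvMonths.getD i ""] else []) ++ pvSel (i + 1) r x := by
  simp only [pvSel, pvEnumFrom, List.filter]
  split_ifs with h <;> simp_all

lemma pvGoMax_eq (r : List Int) : ∀ (i : Nat) (M : Int) (ms : List String),
    pvGoMax r i M ms =
      (pvFMax M r, (if pvFMax M r = M then ms else []) ++ pvSel i r (pvFMax M r)) := by
  induction r with
  | nil => intro i M ms; simp [pvGoMax, pvFMax, pvSel, pvEnumFrom]
  | cons v r ih =>
    intro i M ms
    have hfold : pvFMax M (v :: r) = pvFMax (if v > M then v else M) r := rfl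
    by_cases h1 : v > M
    · have hP : pvFMax M (v :: r) = pvFMax v r := by rw [hfold, if_pos h1]
      have hne : pvFMax v r ≠ M := by have := pvFMax_le r v; omega
      simp only [pvGoMax, if_pos h1, ih, hP, hne, pvSel_cons]
      by_cases h : pvFMax v r = v
      · simp [h]
      · have h' : ¬v = pvFMax v r := fun hh => h hh.symm
        simp [h, h']
    · by_cases h2 : v = M
      · subst h2
        have hP : pvFMax v (v :: r) = pvFMax v r := by
          simp [pvFMax, List.foldl]
        simp only [pvGoMax, if_neg h1, ih, hP, pvSel_cons]
        by_cases h : pvFMax v r = v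
        · simp [h]
        · have h' : ¬v = pvFMax v r := fun hh => h hh.symm
          simp [h, h']
      · have hP : pvFMax M (v :: r) = pvFMax M r := by rw [hfold, if_neg h1]
        have hne : v ≠ pvFMax M r := by have := pvFMax_le r M; omega
        simp only [pvGoMax, if_neg h1, if_neg h2, ih, hP, pvSel_cons, if_neg hne,
          List.nil_append]

lemma pvGoMin_eq (r : List Int) : ∀ (i : Nat) (m : Int) (ns : List String),
    pvGoMin r i m ns =
      (pvFMin m r, (if pvFMin m r = m then ns else []) ++ pvSel i r (pvFMin m r)) := by
  induction r with
  | nil => intro i m ns; simp [pvGoMin, pvFMin, pvSel, pvEnumFrom]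
  | cons v r ih =>
    intro i m ns
    have hfold : pvFMin m (v :: r) = pvFMin (if v < m then v else m) r := rfl
    by_cases h1 : v < m
    · have hP : pvFMin m (v :: r) = pvFMin v r := by rw [hfold, if_pos h1]
      have hne : pvFMin v r ≠ m := by have := pvFMin_le r v; omega
      simp only [pvGoMin, if_pos h1, ih, hP, hne, pvSel_cons]
      by_cases h : pvFMin v r = v
      · simp [h]
      · have h' : ¬v = pvFMin v r := fun hh => h hh.symm
        simp [h, h']
    · by_cases h2 : v = m
      · subst h2
        have hP : pvFMin v (v :: r) = pvFMin v r := by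
          simp [pvFMin, List.foldl]
        simp only [pvGoMin, if_neg h1, ih, hP, pvSel_cons]
        by_cases h : pvFMin v r = v
        · simp [h]
        · have h' : ¬v = pvFMin v r := fun hh => h hh.symm
          simp [h, h']
      · have hP : pvFMin m (v :: r) = pvFMin m r := by rw [hfold, if_neg h1]
        have hne : v ≠ pvFMin m r := by have := pvFMin_le r m; omega
        simp only [pvGoMin, if_neg h1, if_neg h2, ih, hP, pvSel_cons, if_neg hne,
          List.nil_append]

-- ===== VERDICT (by name: the statement is the Claim_ definition above) =====
theorem calc_py_spec : Claim_equal_calc_py := by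
  intro rainData _ _
  unfold Spec_calc_py
  match rainData with
  | [] => rfl
  | h :: t =>
    simp only [calc_py, calc_py_alt, pvCalcLoop_split, pvGoMax_eq, pvGoMin_eq,
      List.map_map]
    show [pvSel 0 (h :: t) (pvFMax h t), pvSel 0 (h :: t) (pvFMin h t)] = _
    rw [pvSel_cons 0 h t (pvFMax h t), pvSel_cons 0 h t (pvFMin h t)]
    by_cases hM : pvFMax h t = h <;> by_cases hm : pvFMin h t = h <;>
      simp [hM, hm] <;>
      first
      | exact ⟨fun hh => hM hh.symm, fun hh => hm hh.symm⟩
      | exact fun hh => hM hh.symm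
      | exact fun hh => hm hh.symm
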